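-- pv_equiv track=rewrite | github.com/bernardoleite/question-generation-portuguese | gen_module/utils/utils_algorithms.py | match_indexes
-- ===== SOURCE A (Python) =====
-- def match_indexes(probelist, head, tail):
--     """ returns a list with all indexes in a list of strings that matches
--         prefix and tail
--     """
--     result=list()
--     step = len(head)
--     last = len(probelist) - len(tail)
--     if (step + len(tail) <= len(probelist)):
--         for i in range(0,last):
--             if (probelist[i:i+len(head)] == head):
--                 for j in range (i+step,last + 1):
--                     if probelist[j:j+len(tail)] == tail:
--                         result.append(list(range(i,j+len(tail))))
--     return result
-- ===== SOURCE B (Python) =====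
-- def match_indexes(probelist, head, tail):
--     """ returns a list with all indexes in a list of strings that matches
--         prefix and tail
--     """
--     n = len(probelist)
--     h = len(head)
--     t = len(tail)
--     if h + t > n:
--         return []
--     last = n - t
--     heads = [i for i in range(last) if probelist[i:i+h] == head]
--     tails = [j for j in range(last + 1) if probelist[j:j+t] == tail]
--     result = []
--     ptr = 0
--     for i in heads:
--         while ptr < len(tails) and tails[ptr] < i + h:
--             ptr += 1
--         for j in tails[ptr:]:
--             result.append(list(range(i, j + t)))
--     return result
-- ===== Notes on version B (the rewrite author's own statement) =====
-- stated objective: alternative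
-- what changed: B precomputes the lists of head-match and tail-match positions once each and then pairs them with a single forward-moving pointer over the sorted tail positions, instead of A's nested loop that re-scans and re-compares the tail window slice-by-slice for every head match.
import Mathlib
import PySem

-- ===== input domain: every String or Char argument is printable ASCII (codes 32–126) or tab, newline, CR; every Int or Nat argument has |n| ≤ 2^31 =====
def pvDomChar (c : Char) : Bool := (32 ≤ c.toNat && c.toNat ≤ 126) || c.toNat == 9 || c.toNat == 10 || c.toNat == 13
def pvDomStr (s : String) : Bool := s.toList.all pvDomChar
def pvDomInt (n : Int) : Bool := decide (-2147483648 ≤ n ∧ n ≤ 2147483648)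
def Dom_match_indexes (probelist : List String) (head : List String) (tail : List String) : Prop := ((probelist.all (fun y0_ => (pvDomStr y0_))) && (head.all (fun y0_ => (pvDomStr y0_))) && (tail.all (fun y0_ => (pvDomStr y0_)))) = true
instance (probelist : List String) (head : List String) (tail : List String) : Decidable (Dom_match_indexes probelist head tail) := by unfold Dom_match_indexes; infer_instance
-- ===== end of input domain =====

-- B precomputes the head-match and tail-match positions once and walks the sorted tail
-- positions with a forward pointer, instead of A's nested rescan of the tail window for
-- every head match (objective: alternative algorithm, same observed cost).

-- ===== PORT A =====
def match_indexes (probelist : List String) (head : List String) (tail : List String) : List (List Int) :=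
  let result : List (List Int) := []
  let step : Int := (head.length : Int)
  let last : Int := (probelist.length : Int) - (tail.length : Int)
  if step + (tail.length : Int) ≤ (probelist.length : Int) then
    (PySem.List.pyRange 0 last 1).foldl (fun result i =>
      if PySem.List.slice probelist (some i) (some (i + (head.length : Int))) = head then
        (PySem.List.pyRange (i + step) (last + 1) 1).foldl (fun result j =>
          if PySem.List.slice probelist (some j) (some (j + (tail.length : Int))) = tail then
            result ++ [PySem.List.pyRange i (j + (tail.length : Int)) 1]
          else result) result
      else result) result
  else result

-- ===== PORT B =====
-- two-pointer walk: 'tails' is the remaining suffix of the precomputed tail positions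
-- (Python's tails[ptr:]); dropWhile is the 'while tails[ptr] < i + h: ptr += 1' advance
def altLoop (h t : Int) : List Int → List Int → List (List Int) → List (List Int)
  | [], _, acc => acc
  | i :: rest, tails, acc =>
      let tl := tails.dropWhile (fun j => decide (j < i + h))
      altLoop h t rest tl (tl.foldl (fun a j => a ++ [PySem.List.pyRange i (j + t) 1]) acc)

def match_indexes_alt (probelist : List String) (head : List String) (tail : List String) : List (List Int) :=
  let n : Int := (probelist.length : Int)
  let h : Int := (head.length : Int)
  let t : Int := (tail.length : Int)
  if n < h + t then []
  else
    let last : Int := n - t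
    let heads := (PySem.List.pyRange 0 last 1).filter
      (fun i => decide (PySem.List.slice probelist (some i) (some (i + h)) = head))
    let tails := (PySem.List.pyRange 0 (last + 1) 1).filter
      (fun j => decide (PySem.List.slice probelist (some j) (some (j + t)) = tail))
    altLoop h t heads tails []

-- ===== PRECONDITION & SPEC =====
def Spec_match_indexes (probelist : List String) (head : List String) (tail : List String) (out : List (List Int)) : Prop := out = match_indexes_alt probelist head tail
instance (probelist : List String) (head : List String) (tail : List String) (out : List (List Int)) : Decidable (Spec_match_indexes probelist head tail out) := by unfold Spec_match_indexes; infer_instance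

-- ===== CLAIM (what is proved, stated in full; the proofs are below) =====
def Claim_equal_match_indexes : Prop := ∀ (probelist : List String) (head : List String) (tail : List String), Dom_match_indexes probelist head tail → Spec_match_indexes probelist head tail (match_indexes probelist head tail)

-- ===== LEMMAS AND PROOFS =====

theorem flatMap_congr_mem {α β : Type} {f g : α → List β} :
    ∀ l : List α, (∀ x ∈ l, f x = g x) → l.flatMap f = l.flatMap g := by
  intro l
  induction l with
  | nil => intro _; rfl
  | cons x xs ih =>
    intro h
    simp only [List.flatMap_cons, h x (List.mem_cons_self),
      ih (fun y hy => h y (List.mem_cons_of_mem _ hy))]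

theorem pyRange_eq_filter (a b : Int) (ha : 0 ≤ a) :
    PySem.List.pyRange a b 1 = (PySem.List.pyRange 0 b 1).filter (fun x => decide (a ≤ x)) := by
  by_cases hab : a ≤ b
  · rw [PySem.List.pyRange_one_append 0 a b ha hab, List.filter_append]
    have h1 : (PySem.List.pyRange 0 a 1).filter (fun x => decide (a ≤ x)) = [] := by
      refine List.filter_eq_nil_iff.mpr ?_
      intro x hx
      have hm := PySem.List.mem_pyRange_one.mp hx
      simp only [decide_eq_true_eq]
      omega
    have h2 : (PySem.List.pyRange a b 1).filter (fun x => decide (a ≤ x)) = PySem.List.pyRange a b 1 := by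
      refine List.filter_eq_self.mpr ?_
      intro x hx
      have hm := PySem.List.mem_pyRange_one.mp hx
      simp only [decide_eq_true_eq]
      omega
    rw [h1, h2, List.nil_append]
  · rw [PySem.List.pyRange_one_eq_nil (by omega)]
    symm
    refine List.filter_eq_nil_iff.mpr ?_
    intro x hx
    have hm := PySem.List.mem_pyRange_one.mp hx
    simp only [decide_eq_true_eq]
    omega

-- on a nondecreasing list the pointer advance is a filter
theorem dropWhile_sorted (c : Int) :
    ∀ l : List Int, l.Pairwise (· ≤ ·) →
      l.dropWhile (fun x => decide (x < c)) = l.filter (fun x => decide (c ≤ x)) := by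
  intro l
  induction l with
  | nil => intro _; rfl
  | cons x xs ih =>
    intro hp
    rw [List.pairwise_cons] at hp
    by_cases hx : x < c
    · have hnc : ¬ (c ≤ x) := by omega
      simp [hx, hnc, ih hp.2]
    · have hc : c ≤ x := by omega
      have hall : ∀ y ∈ xs, c ≤ y := fun y hy => le_trans hc (hp.1 y hy)
      have hf : (x :: xs).filter (fun y => decide (c ≤ y)) = x :: xs := by
        refine List.filter_eq_self.mpr ?_
        intro y hy
        rcases List.mem_cons.mp hy with rfl | hy'
        · simpa using hc
        · simpa using hall y hy'
      simp [hx, hf]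

-- invariant of the two-pointer loop
theorem altLoop_eq (h t : Int) (tails0 : List Int) (hs : tails0.Pairwise (· ≤ ·)) :
    ∀ (heads : List Int) (c : Int) (acc : List (List Int)),
      heads.Pairwise (· ≤ ·) → (∀ i ∈ heads, c ≤ i + h) →
      altLoop h t heads (tails0.filter (fun j => decide (c ≤ j))) acc
        = acc ++ heads.flatMap (fun i =>
            (tails0.filter (fun j => decide (i + h ≤ j))).map
              (fun j => PySem.List.pyRange i (j + t) 1)) := by
  intro heads
  induction heads with
  | nil => intro c acc _ _; simp [altLoop]
  | cons i rest ih =>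
    intro c acc hph hle
    rw [List.pairwise_cons] at hph
    have hsf : (tails0.filter (fun j => decide (c ≤ j))).Pairwise (· ≤ ·) :=
      List.Pairwise.filter _ hs
    have hdw : (tails0.filter (fun j => decide (c ≤ j))).dropWhile (fun j => decide (j < i + h))
        = tails0.filter (fun j => decide (i + h ≤ j)) := by
      rw [dropWhile_sorted (i + h) _ hsf, List.filter_filter]
      refine List.filter_congr ?_
      intro j _
      have hci : c ≤ i + h := hle i List.mem_cons_self
      by_cases hj : i + h ≤ j
      · have hcj : c ≤ j := by omega
        simp [hj, hcj]
      · simp [hj]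
    show altLoop h t rest _ _ = _
    rw [hdw, PySem.List.foldl_append_singleton_eq_map,
        ih (i + h) _ hph.2 (fun i' hi' => by have := hph.1 i' hi'; omega)]
    simp [List.flatMap_cons, List.append_assoc]

-- normal form of port A under its guard
theorem A_core (probelist head tail : List String)
    (hg : (head.length : Int) + (tail.length : Int) ≤ (probelist.length : Int)) :
    match_indexes probelist head tail =
      ((PySem.List.pyRange 0 ((probelist.length : Int) - (tail.length : Int)) 1).filter
          (fun i => decide (PySem.List.slice probelist (some i) (some (i + (head.length : Int))) = head))).flatMap
        (fun i =>
          ((PySem.List.pyRange (i + (head.length : Int)) (((probelist.length : Int) - (tail.length : Int)) + 1) 1).filter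
              (fun j => decide (PySem.List.slice probelist (some j) (some (j + (tail.length : Int))) = tail))).map
            (fun j => PySem.List.pyRange i (j + (tail.length : Int)) 1)) := by
  unfold match_indexes
  rw [if_pos hg]
  rw [PySem.List.foldl_ite_eq_foldl_filter]
  have h1 : ∀ (acc : List (List Int)),
      ∀ i ∈ (PySem.List.pyRange 0 ((probelist.length : Int) - (tail.length : Int)) 1).filter
          (fun i => decide (PySem.List.slice probelist (some i) (some (i + (head.length : Int))) = head)),
      (fun (acc : List (List Int)) (i : Int) =>
        (PySem.List.pyRange (i + (head.length : Int)) (((probelist.length : Int) - (tail.length : Int)) + 1) 1).foldl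
          (fun acc j =>
            if PySem.List.slice probelist (some j) (some (j + (tail.length : Int))) = tail then
              acc ++ [PySem.List.pyRange i (j + (tail.length : Int)) 1]
            else acc) acc) acc i
      = (fun (acc : List (List Int)) (i : Int) => acc ++
          ((PySem.List.pyRange (i + (head.length : Int)) (((probelist.length : Int) - (tail.length : Int)) + 1) 1).filter
              (fun j => decide (PySem.List.slice probelist (some j) (some (j + (tail.length : Int))) = tail))).map
            (fun j => PySem.List.pyRange i (j + (tail.length : Int)) 1)) acc i := by
    intro acc i _
    exact PySem.List.foldl_append_ite _ _ _ _
  rw [PySem.List.foldl_congr_mem _ _ _ _ h1, PySem.List.foldl_append_eq_flatMap, List.nil_append]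

-- normal form of port B under its guard
theorem B_core (probelist head tail : List String)
    (hg : ¬ ((probelist.length : Int) < (head.length : Int) + (tail.length : Int))) :
    match_indexes_alt probelist head tail =
      ((PySem.List.pyRange 0 ((probelist.length : Int) - (tail.length : Int)) 1).filter
          (fun i => decide (PySem.List.slice probelist (some i) (some (i + (head.length : Int))) = head))).flatMap
        (fun i =>
          (((PySem.List.pyRange 0 (((probelist.length : Int) - (tail.length : Int)) + 1) 1).filter
              (fun j => decide (PySem.List.slice probelist (some j) (some (j + (tail.length : Int))) = tail))).filter
              (fun j => decide (i + (head.length : Int) ≤ j))).map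
            (fun j => PySem.List.pyRange i (j + (tail.length : Int)) 1)) := by
  unfold match_indexes_alt
  rw [if_neg hg]
  show altLoop ((head.length : Int)) ((tail.length : Int))
      ((PySem.List.pyRange 0 ((probelist.length : Int) - (tail.length : Int)) 1).filter
        (fun i => decide (PySem.List.slice probelist (some i) (some (i + (head.length : Int))) = head)))
      ((PySem.List.pyRange 0 (((probelist.length : Int) - (tail.length : Int)) + 1) 1).filter
        (fun j => decide (PySem.List.slice probelist (some j) (some (j + (tail.length : Int))) = tail)))
      [] = _
  have hts : ((PySem.List.pyRange 0 (((probelist.length : Int) - (tail.length : Int)) + 1) 1).filter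
      (fun j => decide (PySem.List.slice probelist (some j) (some (j + (tail.length : Int))) = tail))).Pairwise (· ≤ ·) :=
    List.Pairwise.filter _ ((PySem.List.pairwise_lt_pyRange_one 0 _).imp (fun h => le_of_lt h))
  have hhs : ((PySem.List.pyRange 0 ((probelist.length : Int) - (tail.length : Int)) 1).filter
      (fun i => decide (PySem.List.slice probelist (some i) (some (i + (head.length : Int))) = head))).Pairwise (· ≤ ·) :=
    List.Pairwise.filter _ ((PySem.List.pairwise_lt_pyRange_one 0 _).imp (fun h => le_of_lt h))
  have hhe : ∀ i ∈ (PySem.List.pyRange 0 ((probelist.length : Int) - (tail.length : Int)) 1).filter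
      (fun i => decide (PySem.List.slice probelist (some i) (some (i + (head.length : Int))) = head)),
      (0:Int) ≤ i + (head.length : Int) := by
    intro i hi
    have := PySem.List.mem_pyRange_one.mp (List.mem_of_mem_filter hi)
    omega
  have ht0 : ((PySem.List.pyRange 0 (((probelist.length : Int) - (tail.length : Int)) + 1) 1).filter
        (fun j => decide (PySem.List.slice probelist (some j) (some (j + (tail.length : Int))) = tail)))
      = ((PySem.List.pyRange 0 (((probelist.length : Int) - (tail.length : Int)) + 1) 1).filter
        (fun j => decide (PySem.List.slice probelist (some j) (some (j + (tail.length : Int))) = tail))).filter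
        (fun j => decide ((0:Int) ≤ j)) := by
    symm
    refine List.filter_eq_self.mpr ?_
    intro j hj
    have := PySem.List.mem_pyRange_one.mp (List.mem_of_mem_filter hj)
    simp only [decide_eq_true_eq]
    omega
  conv_lhs => rw [ht0]
  rw [altLoop_eq _ _ _ hts _ 0 [] hhs hhe, List.nil_append]

-- ===== VERDICT (by name: the statement is the Claim_ definition above) =====
theorem match_indexes_spec : Claim_equal_match_indexes := by
  intro probelist head tail _
  unfold Spec_match_indexes
  by_cases hg : (head.length : Int) + (tail.length : Int) ≤ (probelist.length : Int)
  · rw [A_core probelist head tail hg, B_core probelist head tail (by omega)]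
    refine flatMap_congr_mem _ ?_
    intro i hi
    have hi0 : (0:Int) ≤ i := by
      have := PySem.List.mem_pyRange_one.mp (List.mem_of_mem_filter hi)
      omega
    rw [pyRange_eq_filter (i + (head.length : Int)) _ (by omega),
        List.filter_filter, List.filter_filter]
    congr 1
    refine List.filter_congr ?_
    intro j _
    exact Bool.and_comm _ _
  · unfold match_indexes match_indexes_alt
    rw [if_neg hg, if_pos (by omega)]
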